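-- pv_equiv track=rewrite | github.com/ibenderskii/igor.lab | HP watershell.py | count_HH_contacts
-- ===== SOURCE A (Python) =====
-- from typing import Tuple, List, Dict
--
-- Vec = Tuple[int, int, int]
--
-- NN_VECS: List[Vec] = [
--     (1,0,0), (-1,0,0),
--     (0,1,0), (0,-1,0),
--     (0,0,1), (0,0,-1)
-- ]
--
-- def add(a:Vec, b:Vec) -> Vec: return (a[0]+b[0], a[1]+b[1], a[2]+b[2])
--
-- def count_HH_contacts(chain:List[Vec], types:List[str]) -> int:
--     pos_to_type = {tuple(chain[i]): types[i] for i in range(len(chain))}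
--     seen = set()
--     hh = 0
--     for pos, t in pos_to_type.items():
--         if t != 'H':
--             continue
--         for v in NN_VECS:
--             nbr = add(pos, v)
--             if pos_to_type.get(nbr, None) == 'H':
--                 a = (pos, nbr) if pos < nbr else (nbr, pos)
--                 if a in seen:
--                     continue
--                 seen.add(a)
--                 hh += 1
--     return hh
-- ===== SOURCE B (Python) =====
-- from typing import Tuple, List
--
-- Vec = Tuple[int, int, int]
--
-- # The three lexicographically-positive lattice directions: every H-H contact
-- # {a, b} with a < b satisfies b - a in POS_DIRS, so counting from the smaller
-- # endpoint needs no seen-set deduplication at all.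
-- POS_DIRS: List[Vec] = [(1, 0, 0), (0, 1, 0), (0, 0, 1)]
--
-- def count_HH_contacts(chain: List[Vec], types: List[str]) -> int:
--     final = {}
--     for pos, t in zip(chain, types):
--         final[tuple(pos)] = t          # last write wins, as in the dict comprehension
--     hs = {p for p, t in final.items() if t == 'H'}
--     return sum(1 for p in hs for d in POS_DIRS
--                if (p[0] + d[0], p[1] + d[1], p[2] + d[2]) in hs)
-- ===== Notes on version B (the rewrite author's own statement) =====
-- stated objective: simpler
-- what changed: B drops A's seen-set deduplication and ordered-pair normalisation entirely: it builds the set of finally-H positions (same last-write-wins dict) and counts each contact exactly once from its lexicographically smaller endpoint by probing only the three positive axis directions.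
import Mathlib
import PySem

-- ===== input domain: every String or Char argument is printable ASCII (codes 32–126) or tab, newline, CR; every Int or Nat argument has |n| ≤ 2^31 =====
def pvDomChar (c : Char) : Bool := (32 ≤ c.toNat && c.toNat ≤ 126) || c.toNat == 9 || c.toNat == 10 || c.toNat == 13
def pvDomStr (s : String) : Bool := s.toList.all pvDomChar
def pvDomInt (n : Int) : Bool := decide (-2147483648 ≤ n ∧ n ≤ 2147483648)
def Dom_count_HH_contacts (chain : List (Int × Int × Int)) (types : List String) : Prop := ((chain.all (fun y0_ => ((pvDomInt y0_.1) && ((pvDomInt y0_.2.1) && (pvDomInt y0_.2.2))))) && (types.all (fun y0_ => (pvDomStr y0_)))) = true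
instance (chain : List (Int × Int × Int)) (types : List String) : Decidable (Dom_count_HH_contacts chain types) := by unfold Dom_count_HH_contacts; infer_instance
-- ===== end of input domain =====

-- B drops A's seen-set deduplication: it counts each H-H contact once from its
-- lexicographically smaller endpoint, probing only the three positive axis directions (objective: simpler).

-- ===== PORT A =====
def pvNN : List (Int × Int × Int) :=
  [(1,0,0), (-1,0,0), (0,1,0), (0,-1,0), (0,0,1), (0,0,-1)]

def pvAdd (a b : Int × Int × Int) : Int × Int × Int :=
  (a.1 + b.1, a.2.1 + b.2.1, a.2.2 + b.2.2)

-- Python tuple '<' is lexicographic; Mathlib's Prod '<' is pointwise, so it is ported by hand (exact)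
def pvLt (a b : Int × Int × Int) : Bool :=
  a.1 < b.1 || (a.1 == b.1 && (a.2.1 < b.2.1 || (a.2.1 == b.2.1 && a.2.2 < b.2.2)))

def count_HH_contacts (chain : List (Int × Int × Int)) (types : List String) : Int :=
  let pos_to_type : PySem.Dict (Int × Int × Int) String :=
    (PySem.List.pyRange 0 (chain.length : Int)).foldl
      (fun d i => d.insert (PySem.List.pyGetD chain i (0,0,0)) (PySem.List.pyGetD types i ""))
      PySem.Dict.empty
  let r :=
    pos_to_type.items.foldl
      (fun (st : PySem.Set ((Int × Int × Int) × (Int × Int × Int)) × Int) pt =>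
        if pt.2 ≠ "H" then st
        else
          pvNN.foldl
            (fun st v =>
              if pos_to_type.get? (pvAdd pt.1 v) == some "H" then
                if PySem.Set.contains st.1 (if pvLt pt.1 (pvAdd pt.1 v) then (pt.1, pvAdd pt.1 v) else (pvAdd pt.1 v, pt.1)) then st
                else (PySem.Set.add st.1 (if pvLt pt.1 (pvAdd pt.1 v) then (pt.1, pvAdd pt.1 v) else (pvAdd pt.1 v, pt.1)), st.2 + 1)
              else st)
            st)
      (PySem.Set.empty, 0)
  r.2

-- ===== PORT B =====
def pvPosDirs : List (Int × Int × Int) := [(1,0,0), (0,1,0), (0,0,1)]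

def count_HH_contacts_alt (chain : List (Int × Int × Int)) (types : List String) : Int :=
  let final : PySem.Dict (Int × Int × Int) String :=
    (chain.zip types).foldl (fun d pt => d.insert pt.1 pt.2) PySem.Dict.empty
  let hs : PySem.Set (Int × Int × Int) :=
    PySem.Set.ofList ((final.items.filter (fun pt => pt.2 == "H")).map Prod.fst)
  hs.foldl
    (fun acc p =>
      pvPosDirs.foldl
        (fun acc d => if PySem.Set.contains hs (pvAdd p d) then acc + 1 else acc)
        acc)
    0

-- ===== PRECONDITION & SPEC =====
-- A evaluates types[i] for every i < len(chain) and raises IndexError when types is shorter than chain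
def Pre_count_HH_contacts (chain : List (Int × Int × Int)) (types : List String) : Prop :=
  chain.length ≤ types.length
instance (chain : List (Int × Int × Int)) (types : List String) : Decidable (Pre_count_HH_contacts chain types) := by unfold Pre_count_HH_contacts; infer_instance

def pvWitness_count_HH_contacts : (List (Int × Int × Int)) × List String :=
  ([(0,0,0), (1,0,0), (1,1,0)], ["H", "H", "H"])

def Spec_count_HH_contacts (chain : List (Int × Int × Int)) (types : List String) (out : Int) : Prop := out = count_HH_contacts_alt chain types
instance (chain : List (Int × Int × Int)) (types : List String) (out : Int) : Decidable (Spec_count_HH_contacts chain types out) := by unfold Spec_count_HH_contacts; infer_instance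

-- ===== CLAIM (what is proved, stated in full; the proofs are below) =====
def Claim_equal_count_HH_contacts : Prop := ∀ (chain : List (Int × Int × Int)) (types : List String), Dom_count_HH_contacts chain types → Pre_count_HH_contacts chain types → Spec_count_HH_contacts chain types (count_HH_contacts chain types)

-- ===== LEMMAS AND PROOFS =====

def pvDict (chain : List (Int × Int × Int)) (types : List String) : PySem.Dict (Int × Int × Int) String :=
  (chain.zip types).foldl (fun d pt => d.insert pt.1 pt.2) PySem.Dict.empty
def pvH (chain : List (Int × Int × Int)) (types : List String) : List (Int × Int × Int) :=
  (((pvDict chain types).items.filter (fun pt => pt.2 == "H")).map Prod.fst)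


theorem pvDict_eq (chain : List (Int × Int × Int)) (types : List String)
    (h : chain.length ≤ types.length) :
    (PySem.List.pyRange 0 (chain.length : Int)).foldl
      (fun d i => d.insert (PySem.List.pyGetD chain i (0,0,0)) (PySem.List.pyGetD types i ""))
      (PySem.Dict.empty : PySem.Dict (Int × Int × Int) String) = pvDict chain types := by
  have hlen : ((chain.zip types).length : Int) = (chain.length : Int) := by
    simp [List.length_zip]; omega
  have h1 : (PySem.List.pyRange 0 (chain.length : Int)).foldl
      (fun d i => d.insert (PySem.List.pyGetD chain i (0,0,0)) (PySem.List.pyGetD types i ""))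
      (PySem.Dict.empty : PySem.Dict (Int × Int × Int) String)
    = (PySem.List.pyRange 0 (chain.length : Int)).foldl
      (fun d j => (fun (d : PySem.Dict (Int × Int × Int) String) (pt : (Int × Int × Int) × String) => d.insert pt.1 pt.2) d
        (PySem.List.pyGetD (chain.zip types) j ((0,0,0), "")))
      PySem.Dict.empty := by
    apply PySem.List.foldl_congr_mem
    intro acc j hj
    rw [PySem.List.mem_pyRange_one] at hj
    obtain ⟨h0, hn⟩ := hj
    have hj' : j = ((j.toNat : Nat) : Int) := by omega
    have hk : j.toNat < chain.length := by omega
    have hk2 : j.toNat < types.length := by omega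
    rw [hj', PySem.List.pyGetD_natCast, PySem.List.pyGetD_natCast, PySem.List.pyGetD_natCast]
    simp [List.getD_eq_getElem?_getD, hk, hk2]
  rw [h1]
  have h2 := PySem.List.foldl_pyRange_pyGetD (chain.zip types) ((0,0,0), "")
    (fun (d : PySem.Dict (Int × Int × Int) String) (pt : (Int × Int × Int) × String) => d.insert pt.1 pt.2)
    PySem.Dict.empty (a := 0) le_rfl
  simp only [PySem.List.len] at h2
  rw [hlen] at h2
  unfold pvDict
  simpa using h2

theorem pvDict_nodup_keys (chain : List (Int × Int × Int)) (types : List String) :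
    (pvDict chain types).keys.Nodup := by
  unfold pvDict
  exact PySem.Dict.nodup_keys_foldl_insert_key (chain.zip types) Prod.fst (fun _ pt => pt.2)
    PySem.Dict.empty (by simp)

theorem pvH_nodup (chain : List (Int × Int × Int)) (types : List String) :
    (pvH chain types).Nodup := by
  have h := pvDict_nodup_keys chain types
  have hsub : ((((pvDict chain types).items.filter (fun pt => pt.2 == "H")).map Prod.fst)).Sublist
      ((pvDict chain types).items.map Prod.fst) :=
    (List.filter_sublist (l := (pvDict chain types).items)).map Prod.fst
  exact hsub.nodup (by simpa [PySem.Dict.keys] using h)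

theorem mem_pvH (chain : List (Int × Int × Int)) (types : List String) (p : Int × Int × Int) :
    p ∈ pvH chain types ↔ (pvDict chain types).get? p = some "H" := by
  rw [PySem.Dict.get?_eq_some_iff_mem_items _ _ _ (pvDict_nodup_keys chain types)]
  unfold pvH
  constructor
  · rintro hp
    simp only [List.mem_map, List.mem_filter] at hp
    obtain ⟨pt, ⟨hmem, hH⟩, rfl⟩ := hp
    have : pt.2 = "H" := by simpa using hH
    simpa [← this] using hmem
  · intro hp
    simp only [List.mem_map, List.mem_filter]
    exact ⟨(p, "H"), ⟨hp, by simp⟩, rfl⟩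

theorem A_inner {α κ : Type} [BEq κ] [LawfulBEq κ] (l : List α) (cond : α → Bool) (f : α → κ) :
    ∀ (s : PySem.Set κ) (c : Int),
    l.foldl (fun st v => if cond v then
        (if PySem.Set.contains st.1 (f v) then st else (PySem.Set.add st.1 (f v), st.2 + 1))
      else st) (s, c)
    = (PySem.Set.update s ((l.filter cond).map f),
       c + ((PySem.Set.update s ((l.filter cond).map f)).length : Int) - (s.length : Int)) := by
  induction l with
  | nil => intro s c; simp [PySem.Set.update]
  | cons x xs ih =>
    intro s c
    by_cases hc : cond x
    · by_cases hm : f x ∈ s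
      · have hcont : PySem.Set.contains s (f x) = true := by
          simp [PySem.Set.contains, hm]
        have hadd : PySem.Set.add s (f x) = s := PySem.Set.add_of_mem hm
        simp only [List.foldl_cons, hc, if_true, hcont, List.filter_cons_of_pos, List.map_cons]
        rw [ih s c]
        have : PySem.Set.update s (f x :: (xs.filter cond).map f)
            = PySem.Set.update s ((xs.filter cond).map f) := by
          simp [PySem.Set.update, hadd]
        rw [this]
      · have hcont : PySem.Set.contains s (f x) = false := by
          simp [PySem.Set.contains, hm]
        have hadd : PySem.Set.add s (f x) = s ++ [f x] := PySem.Set.add_of_not_mem hm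
        simp only [List.foldl_cons, hc, if_true, hcont, Bool.false_eq_true, if_false,
          List.filter_cons_of_pos, List.map_cons]
        rw [ih (PySem.Set.add s (f x)) (c + 1)]
        have hupd : PySem.Set.update s (f x :: (xs.filter cond).map f)
            = PySem.Set.update (PySem.Set.add s (f x)) ((xs.filter cond).map f) := by
          simp [PySem.Set.update]
        rw [hupd]
        have hlen : ((PySem.Set.add s (f x)).length : Int) = (s.length : Int) + 1 := by
          rw [hadd]; simp
        have : c + 1 + ((((PySem.Set.add s (f x)).update ((xs.filter cond).map f)).length : Int)) - ((PySem.Set.add s (f x)).length : Int)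
            = c + ((((PySem.Set.add s (f x)).update ((xs.filter cond).map f)).length : Int)) - (s.length : Int) := by omega
        rw [this]
    · rw [List.filter_cons_of_neg (by simpa using hc)]
      simp only [List.foldl_cons, hc, Bool.false_eq_true, if_false]
      exact ih s c

theorem update_append {κ : Type} [BEq κ] (s : PySem.Set κ) (xs ys : List κ) :
    PySem.Set.update s (xs ++ ys) = PySem.Set.update (PySem.Set.update s xs) ys := by
  simp [PySem.Set.update, List.foldl_append]

theorem length_update_ge {κ : Type} [BEq κ] [LawfulBEq κ] (s : PySem.Set κ) (xs : List κ) :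
    s.length ≤ (PySem.Set.update s xs).length := by
  induction xs generalizing s with
  | nil => simp [PySem.Set.update]
  | cons x xs ih =>
    have h1 : s.length ≤ (PySem.Set.add s x).length := by
      by_cases hm : x ∈ s
      · rw [PySem.Set.add_of_mem hm]
      · rw [PySem.Set.add_of_not_mem hm]; simp
    calc s.length ≤ (PySem.Set.add s x).length := h1
      _ ≤ _ := ih (PySem.Set.add s x)

theorem A_outer {π κ : Type} [BEq κ] [LawfulBEq κ]
    (step : π → PySem.Set κ × Int → PySem.Set κ × Int) (L : π → List κ)
    (hstep : ∀ p s c, step p (s, c)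
      = (PySem.Set.update s (L p), c + ((PySem.Set.update s (L p)).length : Int) - (s.length : Int)))
    (ps : List π) :
    ∀ (s : PySem.Set κ) (c : Int),
    ps.foldl (fun st p => step p st) (s, c)
    = (PySem.Set.update s (ps.flatMap L),
       c + ((PySem.Set.update s (ps.flatMap L)).length : Int) - (s.length : Int)) := by
  induction ps with
  | nil => intro s c; simp [PySem.Set.update]
  | cons p ps ih =>
    intro s c
    rw [List.foldl_cons, hstep p s c, ih]
    rw [List.flatMap_cons, update_append]
    have := length_update_ge s (L p)
    have : c + ((PySem.Set.update s (L p)).length : Int) - (s.length : Int)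
        + (((PySem.Set.update (PySem.Set.update s (L p)) (ps.flatMap L)).length : Int))
        - ((PySem.Set.update s (L p)).length : Int)
      = c + (((PySem.Set.update (PySem.Set.update s (L p)) (ps.flatMap L)).length : Int)) - (s.length : Int) := by
      omega
    rw [this]

theorem B_inner {α : Type} (l : List α) (cond : α → Bool) :
    ∀ (acc : Int), l.foldl (fun a x => if cond x then a + 1 else a) acc
      = acc + ((l.filter cond).length : Int) := by
  induction l with
  | nil => intro acc; simp
  | cons x xs ih =>
    intro acc
    by_cases hc : cond x
    · rw [List.filter_cons_of_pos hc]
      simp only [List.foldl_cons, hc, if_true, ih]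
      simp; omega
    · rw [List.filter_cons_of_neg (by simpa using hc)]
      simp only [List.foldl_cons, hc, Bool.false_eq_true, if_false, ih]

theorem B_outer {π α : Type} (ps : List π) (l : List α) (cond : π → α → Bool) :
    ∀ (acc : Int),
    ps.foldl (fun acc p => l.foldl (fun a x => if cond p x then a + 1 else a) acc) acc
    = acc + ((ps.flatMap (fun p => l.filter (cond p))).length : Int) := by
  induction ps with
  | nil => intro acc; simp
  | cons p ps ih =>
    intro acc
    rw [List.foldl_cons, B_inner, ih, List.flatMap_cons, List.length_append]
    push_cast; ring

theorem lt_add_posdir (p d : Int × Int × Int) (hd : d ∈ pvPosDirs) :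
    pvLt p (pvAdd p d) = true := by
  simp only [pvPosDirs, List.mem_cons, List.not_mem_nil, or_false] at hd
  rcases hd with rfl | rfl | rfl <;> simp [pvLt, pvAdd]

theorem posdir_mem_nn (d : Int × Int × Int) (hd : d ∈ pvPosDirs) : d ∈ pvNN := by
  simp only [pvPosDirs, List.mem_cons, List.not_mem_nil, or_false] at hd
  rcases hd with rfl | rfl | rfl <;> simp [pvNN]

theorem add_injective (p : Int × Int × Int) {d d' : Int × Int × Int}
    (h : pvAdd p d = pvAdd p d') : d = d' := by
  simp only [pvAdd, Prod.mk.injEq] at h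
  obtain ⟨h1, h2, h3⟩ := h
  exact Prod.ext (by omega) (Prod.ext (by omega) (by omega))

theorem mem_LA_iff_mem_LB (D : PySem.Dict (Int × Int × Int) String) (H : List (Int × Int × Int))
    (hmem : ∀ p, p ∈ H ↔ D.get? p = some "H")
    (x : (Int × Int × Int) × (Int × Int × Int)) :
    x ∈ H.flatMap (fun p => (pvNN.filter (fun v => (D.get? (pvAdd p v) == some "H"))).map
          (fun v => if pvLt p (pvAdd p v) then (p, pvAdd p v) else (pvAdd p v, p)))
    ↔ x ∈ H.flatMap (fun p => (pvPosDirs.filter (fun d => PySem.Set.contains H (pvAdd p d))).map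
          (fun d => (p, pvAdd p d))) := by
  simp only [List.mem_flatMap, List.mem_map, List.mem_filter]
  constructor
  · rintro ⟨p, hp, v, ⟨hv, hget⟩, rfl⟩
    have hq : pvAdd p v ∈ H := (hmem _).2 (by simpa using hget)
    simp only [pvNN, List.mem_cons, List.not_mem_nil, or_false] at hv
    rcases hv with rfl | rfl | rfl | rfl | rfl | rfl
    -- positive directions: pair is (p, q), counted at p
    case inl =>
      refine ⟨p, hp, (1,0,0), ⟨by simp [pvPosDirs], by simp [PySem.Set.contains, hq]⟩, ?_⟩
      rw [if_pos (lt_add_posdir p (1,0,0) (by simp [pvPosDirs]))]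
    case inr.inl =>
      -- v = (-1,0,0): pair is (q, p), counted at q with direction (1,0,0)
      refine ⟨pvAdd p (-1,0,0), hq, (1,0,0), ⟨by simp [pvPosDirs], ?_⟩, ?_⟩
      · have : pvAdd (pvAdd p (-1,0,0)) (1,0,0) = p := by
          simp [pvAdd]
        rw [this]; simp [PySem.Set.contains, hp]
      · have hpa : pvAdd (pvAdd p (-1,0,0)) (1,0,0) = p := by simp [pvAdd]
        rw [if_neg (by simp [pvLt, pvAdd]), hpa]
    case inr.inr.inl =>
      refine ⟨p, hp, (0,1,0), ⟨by simp [pvPosDirs], by simp [PySem.Set.contains, hq]⟩, ?_⟩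
      rw [if_pos (lt_add_posdir p (0,1,0) (by simp [pvPosDirs]))]
    case inr.inr.inr.inl =>
      refine ⟨pvAdd p (0,-1,0), hq, (0,1,0), ⟨by simp [pvPosDirs], ?_⟩, ?_⟩
      · have : pvAdd (pvAdd p (0,-1,0)) (0,1,0) = p := by simp [pvAdd]
        rw [this]; simp [PySem.Set.contains, hp]
      · have hpa : pvAdd (pvAdd p (0,-1,0)) (0,1,0) = p := by simp [pvAdd]
        rw [if_neg (by simp [pvLt, pvAdd]), hpa]
    case inr.inr.inr.inr.inl =>
      refine ⟨p, hp, (0,0,1), ⟨by simp [pvPosDirs], by simp [PySem.Set.contains, hq]⟩, ?_⟩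
      rw [if_pos (lt_add_posdir p (0,0,1) (by simp [pvPosDirs]))]
    case inr.inr.inr.inr.inr =>
      refine ⟨pvAdd p (0,0,-1), hq, (0,0,1), ⟨by simp [pvPosDirs], ?_⟩, ?_⟩
      · have : pvAdd (pvAdd p (0,0,-1)) (0,0,1) = p := by simp [pvAdd]
        rw [this]; simp [PySem.Set.contains, hp]
      · have hpa : pvAdd (pvAdd p (0,0,-1)) (0,0,1) = p := by simp [pvAdd]
        rw [if_neg (by simp [pvLt, pvAdd]), hpa]
  · rintro ⟨p, hp, d, ⟨hd, hcont⟩, rfl⟩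
    have hq : pvAdd p d ∈ H := by simpa [PySem.Set.contains] using hcont
    refine ⟨p, hp, d, ⟨posdir_mem_nn d hd, by simp [(hmem _).1 hq]⟩, ?_⟩
    rw [if_pos (lt_add_posdir p d hd)]

theorem LB_nodup (H : List (Int × Int × Int)) (hnd : H.Nodup) (cond : (Int × Int × Int) → (Int × Int × Int) → Bool) :
    (H.flatMap (fun p => (pvPosDirs.filter (cond p)).map (fun d => (p, pvAdd p d)))).Nodup := by
  rw [List.nodup_flatMap]
  constructor
  · intro p _
    refine List.Nodup.map_on ?_ (List.Nodup.filter _ (by decide))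
    intro d hd d' hd' h
    simp only [Prod.mk.injEq] at h
    exact add_injective p h.2
  · refine List.Pairwise.imp ?_ hnd
    intro p p' hne x hx hx'
    simp only [List.mem_map, List.mem_filter] at hx hx'
    obtain ⟨d, _, rfl⟩ := hx
    obtain ⟨d', _, h⟩ := hx'
    exact hne (by simpa using congrArg Prod.fst h.symm)

def pvLA (chain : List (Int × Int × Int)) (types : List String) :
    List ((Int × Int × Int) × (Int × Int × Int)) :=
  (pvH chain types).flatMap (fun p =>
    (pvNN.filter (fun v => ((pvDict chain types).get? (pvAdd p v) == some "H"))).map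
      (fun v => if pvLt p (pvAdd p v) then (p, pvAdd p v) else (pvAdd p v, p)))

theorem skip_filter {π σ : Type} (l : List (π × String)) (F : σ → π × String → σ) :
    ∀ (init : σ),
    l.foldl (fun st pt => if pt.2 ≠ "H" then st else F st pt) init
    = (l.filter (fun pt => pt.2 == "H")).foldl F init := by
  induction l with
  | nil => intro init; rfl
  | cons pt l ih =>
    intro init
    by_cases h : pt.2 = "H"
    · rw [List.filter_cons_of_pos (by simp [h])]
      simp only [List.foldl_cons, h]
      rw [if_neg (by simp), ih]
    · rw [List.filter_cons_of_neg (by simp [h])]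
      simp only [List.foldl_cons]
      rw [if_pos h, ih]

theorem foldl_fst {π ρ σ : Type} (l : List (π × ρ)) (G : σ → π → σ) :
    ∀ (init : σ), l.foldl (fun st pt => G st pt.1) init = (l.map Prod.fst).foldl G init := by
  induction l with
  | nil => intro init; rfl
  | cons pt l ih => intro init; simp only [List.foldl_cons, List.map_cons, ih]

theorem A_eq (chain : List (Int × Int × Int)) (types : List String)
    (h : chain.length ≤ types.length) :
    count_HH_contacts chain types = ((PySem.Set.ofList (pvLA chain types)).length : Int) := by
  simp only [count_HH_contacts]
  rw [pvDict_eq chain types h]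
  trans (List.foldl
      (fun (st : PySem.Set ((Int × Int × Int) × (Int × Int × Int)) × Int) (pt : (Int × Int × Int) × String) =>
        List.foldl
      (fun (st : PySem.Set ((Int × Int × Int) × (Int × Int × Int)) × Int) (v : Int × Int × Int) =>
        if ((pvDict chain types).get? (pvAdd pt.1 v) == some "H") = true then
          if PySem.Set.contains st.1 (if pvLt pt.1 (pvAdd pt.1 v) = true then (pt.1, pvAdd pt.1 v) else (pvAdd pt.1 v, pt.1)) = true then st
          else (PySem.Set.add st.1 (if pvLt pt.1 (pvAdd pt.1 v) = true then (pt.1, pvAdd pt.1 v) else (pvAdd pt.1 v, pt.1)), st.2 + 1)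
        else st)
          st pvNN)
      (PySem.Set.empty, 0)
      (((pvDict chain types).items.filter (fun pt => pt.2 == "H")))).2
  · exact congrArg Prod.snd (skip_filter _ _ _)
  trans (List.foldl
      (fun (st : PySem.Set ((Int × Int × Int) × (Int × Int × Int)) × Int) (p : Int × Int × Int) =>
        List.foldl
      (fun (st : PySem.Set ((Int × Int × Int) × (Int × Int × Int)) × Int) (v : Int × Int × Int) =>
        if ((pvDict chain types).get? (pvAdd p v) == some "H") = true then
          if PySem.Set.contains st.1 (if pvLt p (pvAdd p v) = true then (p, pvAdd p v) else (pvAdd p v, p)) = true then st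
          else (PySem.Set.add st.1 (if pvLt p (pvAdd p v) = true then (p, pvAdd p v) else (pvAdd p v, p)), st.2 + 1)
        else st)
          st pvNN)
      (PySem.Set.empty, 0) (pvH chain types)).2
  · exact congrArg Prod.snd (foldl_fst _
      (fun (st : PySem.Set ((Int × Int × Int) × (Int × Int × Int)) × Int) (p : Int × Int × Int) =>
        List.foldl
      (fun (st : PySem.Set ((Int × Int × Int) × (Int × Int × Int)) × Int) (v : Int × Int × Int) =>
        if ((pvDict chain types).get? (pvAdd p v) == some "H") = true then
          if PySem.Set.contains st.1 (if pvLt p (pvAdd p v) = true then (p, pvAdd p v) else (pvAdd p v, p)) = true then st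
          else (PySem.Set.add st.1 (if pvLt p (pvAdd p v) = true then (p, pvAdd p v) else (pvAdd p v, p)), st.2 + 1)
        else st)
          st pvNN) _)
  trans (((PySem.Set.update PySem.Set.empty ((pvH chain types).flatMap (fun p =>
      (pvNN.filter (fun v => ((pvDict chain types).get? (pvAdd p v) == some "H"))).map
        (fun v => if pvLt p (pvAdd p v) then (p, pvAdd p v) else (pvAdd p v, p))))) ,
      (0 : Int) + ((PySem.Set.update PySem.Set.empty ((pvH chain types).flatMap (fun p =>
      (pvNN.filter (fun v => ((pvDict chain types).get? (pvAdd p v) == some "H"))).map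
        (fun v => if pvLt p (pvAdd p v) then (p, pvAdd p v) else (pvAdd p v, p))))).length : Int)
      - ((PySem.Set.empty : PySem.Set ((Int × Int × Int) × (Int × Int × Int))).length : Int)) : _ × Int).2
  · exact congrArg Prod.snd (A_outer _ _ (fun p s c => A_inner _ _ _ s c) (pvH chain types) _ _)
  show (0 : Int) + _ - _ = _
  rw [show (PySem.Set.empty : PySem.Set ((Int × Int × Int) × (Int × Int × Int))) = [] from rfl,
    PySem.Set.update_nil_left]
  show (0 : Int) + ((PySem.Set.ofList (pvLA chain types)).length : Int) - (([] : List ((Int × Int × Int) × (Int × Int × Int))).length : Int) = _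
  simp

theorem B_eq (chain : List (Int × Int × Int)) (types : List String) :
    count_HH_contacts_alt chain types
    = (((pvH chain types).flatMap (fun p =>
        pvPosDirs.filter (fun d => PySem.Set.contains (pvH chain types) (pvAdd p d)))).length : Int) := by
  simp only [count_HH_contacts_alt]
  have hof : PySem.Set.ofList
        (List.map Prod.fst
          (List.filter (fun pt => pt.2 == "H")
            (List.foldl (fun d pt => d.insert pt.1 pt.2) PySem.Dict.empty (chain.zip types)).items))
      = pvH chain types :=
    PySem.Set.ofList_eq_self_of_nodup _ (pvH_nodup chain types)
  rw [hof]
  rw [B_outer]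
  omega

theorem len_eq (chain : List (Int × Int × Int)) (types : List String) :
    ((PySem.Set.ofList (pvLA chain types)).length : Int)
    = (((pvH chain types).flatMap (fun p =>
        pvPosDirs.filter (fun d => PySem.Set.contains (pvH chain types) (pvAdd p d)))).length : Int) := by
  have hperm : (PySem.Set.ofList (pvLA chain types)).Perm
      ((pvH chain types).flatMap (fun p =>
        (pvPosDirs.filter (fun d => PySem.Set.contains (pvH chain types) (pvAdd p d))).map
          (fun d => (p, pvAdd p d)))) := by
    rw [List.perm_ext_iff_of_nodup (PySem.Set.nodup_ofList _)
      (LB_nodup _ (pvH_nodup chain types) _)]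
    intro x
    rw [PySem.Set.mem_ofList]
    exact mem_LA_iff_mem_LB (pvDict chain types) (pvH chain types)
      (mem_pvH chain types) x
  rw [hperm.length_eq]
  simp [List.length_flatMap]

-- ===== VERDICT (by name: the statement is the Claim_ definition above) =====
theorem count_HH_contacts_spec : Claim_equal_count_HH_contacts := by
  intro chain types hdom hpre
  unfold Spec_count_HH_contacts
  rw [A_eq chain types hpre, B_eq chain types, len_eq]
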